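-- pv_equiv track=rewrite | github.com/michalholes/patchhub | amp/am_patch/issue_diff.py | _normalize_rel_paths
-- ===== SOURCE A (Python) =====
-- def _normalize_rel_paths(paths: list[str]) -> list[str]:
--     norm: list[str] = []
--     seen: set[str] = set()
--     for raw in paths:
--         p = (raw or "").strip().lstrip("/")
--         if not p:
--             continue
--         if p not in seen:
--             seen.add(p)
--             norm.append(p)
--     norm.sort()
--     return norm
-- ===== SOURCE B (Python) =====
-- def _normalize_rel_paths(paths: list[str]) -> list[str]:
--     # Collect all normalized non-empty paths (dups kept), sort once,
--     # then remove adjacent duplicates in one linear pass (no hash set).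
--     norm: list[str] = []
--     for raw in paths:
--         p = (raw or "").strip().lstrip("/")
--         if p:
--             norm.append(p)
--     norm.sort()
--     out: list[str] = []
--     for p in norm:
--         if not out or p != out[-1]:
--             out.append(p)
--     return out
-- ===== Notes on version B (the rewrite author's own statement) =====
-- stated objective: alternative
-- what changed: Replaces the hash-set first-occurrence dedup followed by a sort with a sort of all normalized paths followed by a single linear adjacent-duplicate-removal pass, maintaining only the previously emitted element instead of a seen-set.
import Mathlib
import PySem

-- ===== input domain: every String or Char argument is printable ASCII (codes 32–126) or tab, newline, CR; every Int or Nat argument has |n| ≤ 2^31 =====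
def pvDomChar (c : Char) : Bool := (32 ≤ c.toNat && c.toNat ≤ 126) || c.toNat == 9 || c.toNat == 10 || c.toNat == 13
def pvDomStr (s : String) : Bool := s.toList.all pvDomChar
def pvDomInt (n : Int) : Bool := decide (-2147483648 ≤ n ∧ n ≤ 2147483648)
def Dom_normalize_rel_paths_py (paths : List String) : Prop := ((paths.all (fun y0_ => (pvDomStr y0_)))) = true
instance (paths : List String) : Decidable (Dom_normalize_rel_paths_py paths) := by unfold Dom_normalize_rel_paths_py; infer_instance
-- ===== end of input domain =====

-- B replaces A's hash-set first-occurrence dedup followed by a sort with a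
-- sort of all normalized paths followed by one adjacent-duplicate-removal pass
-- (alternative decomposition, same asymptotic cost); return values proved equal.

-- shared normalization of one path: (raw or "").strip().lstrip("/").
-- 'raw or ""' is 'raw' for a string argument; lstrip("/") is ported by hand as
-- dropWhile (· == '/'), exact: lstrip with an explicit chars set drops exactly
-- the leading characters belonging to that set.
def pvNormOne (raw : String) : String :=
  String.ofList ((PySem.Str.strip raw).toList.dropWhile (fun c => c == '/'))

-- ===== PORT A =====
def normalize_rel_paths_py (paths : List String) : List String :=
  let st := paths.foldl (fun (st : List String × PySem.Set String) raw =>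
      let p := pvNormOne raw
      if p = "" then st
      else if PySem.Set.contains st.2 p then st
      else (st.1 ++ [p], PySem.Set.add st.2 p))
    ([], PySem.Set.ofList [])
  PySem.List.sorted st.1 (fun x => x) false

-- ===== PORT B =====
def normalize_rel_paths_py_alt (paths : List String) : List String :=
  let norm := paths.foldl (fun acc raw =>
      let p := pvNormOne raw
      if p = "" then acc else acc ++ [p]) []
  let srt := PySem.List.sorted norm (fun x => x) false
  srt.foldl (fun out p =>
      if out = [] ∨ PySem.List.pyGet? out (-1) ≠ some p then out ++ [p] else out) []

-- ===== PRECONDITION & SPEC =====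
def Spec_normalize_rel_paths_py (paths : List String) (out : List String) : Prop := out = normalize_rel_paths_py_alt paths
instance (paths : List String) (out : List String) : Decidable (Spec_normalize_rel_paths_py paths out) := by unfold Spec_normalize_rel_paths_py; infer_instance

-- ===== CLAIM (what is proved, stated in full; the proofs are below) =====
def Claim_equal_normalize_rel_paths_py : Prop := ∀ (paths : List String), Dom_normalize_rel_paths_py paths → Spec_normalize_rel_paths_py paths (normalize_rel_paths_py paths)

-- ===== LEMMAS AND PROOFS =====

-- the normalized non-empty paths, duplicates kept
def pvF (paths : List String) : List String :=
  (paths.map pvNormOne).filter (fun p => p ≠ "")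

lemma pvB_norm (paths : List String) (acc : List String) :
    paths.foldl (fun acc raw =>
      let p := pvNormOne raw
      if p = "" then acc else acc ++ [p]) acc = acc ++ pvF paths := by
  induction paths generalizing acc with
  | nil => simp [pvF]
  | cons x xs ih =>
    simp only [List.foldl_cons]
    by_cases h : pvNormOne x = "" <;> simp [h, ih, pvF]

lemma pvA_loop (paths : List String) (s : PySem.Set String) :
    paths.foldl (fun (st : List String × PySem.Set String) raw =>
      let p := pvNormOne raw
      if p = "" then st
      else if PySem.Set.contains st.2 p then st
      else (st.1 ++ [p], PySem.Set.add st.2 p)) (s, s)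
    = (PySem.Set.update s (pvF paths), PySem.Set.update s (pvF paths)) := by
  induction paths generalizing s with
  | nil => simp [pvF, PySem.Set.update]
  | cons x xs ih =>
    simp only [List.foldl_cons]
    by_cases h : pvNormOne x = ""
    · simpa [h, pvF, PySem.Set.update, List.filter_cons] using ih s
    · by_cases hc : PySem.Set.contains s (pvNormOne x) = true
      · have hmem : pvNormOne x ∈ s := (PySem.Set.contains_iff s _).1 hc
        have hadd : PySem.Set.add s (pvNormOne x) = s := PySem.Set.add_of_mem hmem
        have := ih s
        simpa [h, hc, hmem, pvF, List.filter_cons, PySem.Set.update_cons, hadd] using this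
      · have hnm : pvNormOne x ∉ s := fun hm => hc ((PySem.Set.contains_iff s _).2 hm)
        have hadd : PySem.Set.add s (pvNormOne x) = s ++ [pvNormOne x] :=
          PySem.Set.add_of_not_mem hnm
        have := ih (PySem.Set.add s (pvNormOne x))
        simpa [h, hc, hnm, pvF, List.filter_cons, PySem.Set.update_cons, hadd] using this

lemma pvGet_neg_one (l : List String) : PySem.List.pyGet? l (-1) = l.getLast? := by
  cases l with
  | nil => simp [PySem.List.pyGet?]
  | cons x xs => simp [PySem.List.pyGet?, PySem.List.pyIdx?, List.getLast?_eq_getElem?]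

-- every element of a <-sorted list is ≤ its last element
lemma pvLast_max (acc : List String) (a : String) (hacc : acc.Pairwise (· < ·))
    (hl : acc.getLast? = some a) : ∀ b ∈ acc, b ≤ a := by
  rcases List.getLast?_eq_some_iff.1 hl with ⟨init, rfl⟩
  have h := (List.pairwise_append.1 hacc).2.2
  intro b hb
  rcases List.mem_append.1 hb with hb | hb
  · exact le_of_lt (h b hb a (List.mem_singleton_self a))
  · simp at hb; simp [hb]

-- the adjacent-dedup pass on a ≤-sorted list: result <-sorted, same members
lemma pvAdj_loop (ys : List String) (acc : List String)
    (hys : ys.Pairwise (· ≤ ·)) (hacc : acc.Pairwise (· < ·))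
    (hle : ∀ b ∈ acc, ∀ y ∈ ys, b ≤ y) :
    (ys.foldl (fun out p =>
        if out = [] ∨ PySem.List.pyGet? out (-1) ≠ some p then out ++ [p] else out) acc).Pairwise (· < ·)
    ∧ ∀ x, x ∈ ys.foldl (fun out p =>
        if out = [] ∨ PySem.List.pyGet? out (-1) ≠ some p then out ++ [p] else out) acc
        ↔ x ∈ acc ∨ x ∈ ys := by
  induction ys generalizing acc with
  | nil =>
    refine ⟨by simpa using hacc, ?_⟩
    simp
  | cons p t ih =>
    have hyst : t.Pairwise (· ≤ ·) := hys.of_cons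
    have hpt : ∀ y ∈ t, p ≤ y := fun y hy => List.rel_of_pairwise_cons hys hy
    simp only [List.foldl_cons]
    by_cases hcond : acc = [] ∨ PySem.List.pyGet? acc (-1) ≠ some p
    · -- p is appended
      have hlt : ∀ b ∈ acc, b < p := by
        intro b hb
        rcases hcond with h0 | hne
        · simp [h0] at hb
        · rw [pvGet_neg_one] at hne
          cases hlast : acc.getLast? with
          | none =>
            exact absurd (List.getLast?_eq_none_iff.1 hlast) (by intro h; simp [h] at hb)
          | some a =>
            have hap : a ≠ p := by intro h; exact hne (by rw [hlast, h])
            have hba : b ≤ a := pvLast_max acc a hacc hlast b hb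
            have hay : a ≤ p := hle a (List.mem_of_getLast? hlast) p (List.mem_cons_self)
            exact lt_of_le_of_lt hba (lt_of_le_of_ne hay hap)
      have hacc' : (acc ++ [p]).Pairwise (· < ·) := by
        rw [List.pairwise_append]
        exact ⟨hacc, List.pairwise_singleton _ _, by
          intro b hb q hq; simp at hq; subst hq; exact hlt b hb⟩
      have hle' : ∀ b ∈ acc ++ [p], ∀ y ∈ t, b ≤ y := by
        intro b hb y hy
        rcases List.mem_append.1 hb with hb | hb
        · exact hle b hb y (List.mem_cons_of_mem _ hy)
        · simp at hb; subst hb; exact hpt y hy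
      rcases ih (acc ++ [p]) hyst hacc' hle' with ⟨h1, h2⟩
      refine ⟨by simpa [hcond] using h1, ?_⟩
      intro x
      rw [if_pos hcond, h2 x]
      simp [or_assoc, or_comm, or_left_comm]
    · -- p is skipped: acc ≠ [] and last acc = p, so p ∈ acc
      push_neg at hcond
      have hlast : acc.getLast? = some p := by
        have := hcond.2; rw [pvGet_neg_one] at this; simpa using this
      have hpmem : p ∈ acc := List.mem_of_getLast? hlast
      have hle' : ∀ b ∈ acc, ∀ y ∈ t, b ≤ y :=
        fun b hb y hy => hle b hb y (List.mem_cons_of_mem _ hy)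
      rcases ih acc hyst hacc hle' with ⟨h1, h2⟩
      have hif : ¬ (acc = [] ∨ PySem.List.pyGet? acc (-1) ≠ some p) := by
        push_neg; exact hcond
      refine ⟨by simpa [hif] using h1, ?_⟩
      intro x
      rw [if_neg hif, h2 x]
      constructor
      · rintro (h | h)
        · exact Or.inl h
        · exact Or.inr (List.mem_cons_of_mem _ h)
      · rintro (h | h)
        · exact Or.inl h
        · rcases List.mem_cons.1 h with rfl | h
          · exact Or.inl hpmem
          · exact Or.inr h

-- ===== VERDICT (by name: the statement is the Claim_ definition above) =====
theorem normalize_rel_paths_py_spec : Claim_equal_normalize_rel_paths_py := by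
  intro paths _
  show normalize_rel_paths_py paths = normalize_rel_paths_py_alt paths
  unfold normalize_rel_paths_py normalize_rel_paths_py_alt
  rw [pvB_norm]
  have hofnil : (PySem.Set.ofList ([] : List String)) = ([] : PySem.Set String) := rfl
  rw [hofnil, pvA_loop paths ([] : PySem.Set String)]
  simp only [List.nil_append]
  -- A's list is ofList (pvF paths)
  have hAlist : PySem.Set.update ([] : PySem.Set String) (pvF paths)
      = PySem.Set.ofList (pvF paths) := PySem.Set.update_nil_left _
  rw [hAlist]
  -- B's second pass
  set ys := PySem.List.sorted (pvF paths) (fun x => x) false with hys_def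
  have hys : ys.Pairwise (· ≤ ·) := by
    simpa using PySem.List.sorted_pairwise (pvF paths) (fun x => x)
  rcases pvAdj_loop ys [] hys (List.Pairwise.nil) (by intro b hb; simp at hb)
    with ⟨hlt, hmem⟩
  set L2 := ys.foldl (fun out p =>
      if out = [] ∨ PySem.List.pyGet? out (-1) ≠ some p then out ++ [p] else out) [] with hL2
  -- L2 is a strictly increasing rearrangement of ofList (pvF paths)
  have hmem' : ∀ x, x ∈ L2 ↔ x ∈ PySem.Set.ofList (pvF paths) := by
    intro x
    rw [hmem x, PySem.Set.mem_ofList]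
    simp [hys_def, PySem.List.mem_sorted]
  have hnd2 : L2.Nodup := hlt.imp ne_of_lt
  have hperm : L2.Perm (PySem.Set.ofList (pvF paths)) :=
    (List.perm_ext_iff_of_nodup hnd2 (PySem.Set.nodup_ofList _)).2 hmem'
  exact (PySem.List.sorted_eq_of_perm_of_pairwise_lt (PySem.Set.ofList (pvF paths)) L2 (fun x => x) hperm (by simpa using hlt))
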